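-- pv_equiv track=rewrite | github.com/pawlowiczf/WDI-2023 | WDI zestaw 4/20 szachownica.py | sum_of_table
-- ===== SOURCE A (Python) =====
-- def sum_of_table(tab):
--     n = len(tab)
--     kolumny = [0]*n
--     wiersze = [0]*n
--     suma = 0
--
--     for y in range(n):
--         for x in range(n):
--             suma += tab[y][x]
--         wiersze[y] = suma
--         suma = 0
--
--     for x in range(n):
--         for y in range(n):
--             suma += tab[y][x]
--         kolumny[x] = suma
--         suma = 0
--
--     return kolumny, wiersze
-- ===== SOURCE B (Python) =====
-- def sum_of_table(tab):
--     # Single pass over the table: each cell tab[y][x] is read once and added to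
--     # both its row total and its column total.
--     n = len(tab)
--     kolumny = [0] * n
--     wiersze = [0] * n
--     for y in range(n):
--         for x in range(n):
--             v = tab[y][x]
--             wiersze[y] += v
--             kolumny[x] += v
--     return kolumny, wiersze
-- ===== Notes on version B (the rewrite author's own statement) =====
-- stated objective: simpler
-- what changed: B makes one pass over the n x n table, adding each cell to its row total and its column total in the same iteration, instead of A's two separate full scans (row pass then column pass) with a reset accumulator.
import Mathlib
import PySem

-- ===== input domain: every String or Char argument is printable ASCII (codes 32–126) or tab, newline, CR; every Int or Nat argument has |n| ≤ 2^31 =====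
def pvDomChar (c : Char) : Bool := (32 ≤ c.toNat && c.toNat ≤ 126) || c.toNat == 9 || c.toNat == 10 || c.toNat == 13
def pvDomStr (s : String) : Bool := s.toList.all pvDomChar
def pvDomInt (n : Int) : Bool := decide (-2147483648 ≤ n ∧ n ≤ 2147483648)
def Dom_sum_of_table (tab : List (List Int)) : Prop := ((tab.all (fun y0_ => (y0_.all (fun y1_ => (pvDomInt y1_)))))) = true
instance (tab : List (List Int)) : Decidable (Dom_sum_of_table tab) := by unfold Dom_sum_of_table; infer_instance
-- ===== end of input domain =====

-- B computes row and column sums in a single pass over the table (one nested loop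
-- updating both totals per cell) instead of A's two separate full scans; same results.


-- ===== PORT A =====
-- tab[y][x]; exact for 0 ≤ y < len(tab), 0 ≤ x < len(tab[y]) (guaranteed by Pre_)
def pvCell (tab : List (List Int)) (y x : Nat) : Int := (tab.getD y []).getD x 0

def sum_of_table (tab : List (List Int)) : List Int × List Int :=
  let n := tab.length
  -- first loop: wiersze[y] = suma of row y (accumulator reset per row)
  let wiersze : List Int :=
    (List.range n).map (fun y => (List.range n).foldl (fun suma x => suma + pvCell tab y x) 0)
  -- second loop: kolumny[x] = suma of column x
  let kolumny : List Int :=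
    (List.range n).map (fun x => (List.range n).foldl (fun suma y => suma + pvCell tab y x) 0)
  (kolumny, wiersze)

-- ===== PORT B =====
def sum_of_table_alt (tab : List (List Int)) : List Int × List Int :=
  let n := tab.length
  (List.range n).foldl
    (fun kw y =>
      (List.range n).foldl
        (fun (kw : List Int × List Int) x =>
          (kw.1.set x (kw.1.getD x 0 + pvCell tab y x),
           kw.2.set y (kw.2.getD y 0 + pvCell tab y x)))
        kw)
    (List.replicate n 0, List.replicate n 0)

-- ===== PRECONDITION & SPEC =====
-- Pre_: Python A evaluates tab[y][x] for all y, x < len(tab); it raises IndexError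
-- exactly when some row is shorter than len(tab), so those inputs are excluded.
def Pre_sum_of_table (tab : List (List Int)) : Prop :=
  ∀ row ∈ tab, tab.length ≤ row.length
instance (tab : List (List Int)) : Decidable (Pre_sum_of_table tab) := by
  unfold Pre_sum_of_table; infer_instance

def pvWitness_sum_of_table : List (List Int) := [[1, 2], [3, 4]]

def Spec_sum_of_table (tab : List (List Int)) (out : List Int × List Int) : Prop := out = sum_of_table_alt tab
instance (tab : List (List Int)) (out : List Int × List Int) : Decidable (Spec_sum_of_table tab out) := by unfold Spec_sum_of_table; infer_instance

-- ===== CLAIM (what is proved, stated in full; the proofs are below) =====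
def Claim_equal_sum_of_table : Prop := ∀ (tab : List (List Int)), Dom_sum_of_table tab → Pre_sum_of_table tab → Spec_sum_of_table tab (sum_of_table tab)

-- ===== LEMMAS AND PROOFS =====

-- a fold whose step acts componentwise on a pair splits into two folds
theorem pv_foldl_pair_split {α β γ : Type} (xs : List α) (f : β → α → β) (g : γ → α → γ)
    (b : β) (c : γ) :
    xs.foldl (fun p x => (f p.1 x, g p.2 x)) (b, c) = (xs.foldl f b, xs.foldl g c) := by
  induction xs generalizing b c with
  | nil => rfl
  | cons x xs ih => simpa using ih (f b x) (g c x)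

theorem pv_foldl_add_sum (c : Nat → Int) (xs : List Nat) (s : Int) :
    xs.foldl (fun s x => s + c x) s = s + (xs.map c).sum := by
  induction xs generalizing s with
  | nil => simp
  | cons x xs ih => simp [ih, add_assoc]

theorem pv_foldl_len {α : Type} (f : List Int → α → List Int)
    (h : ∀ w x, (f w x).length = w.length) :
    ∀ (xs : List α) (w : List Int), (xs.foldl f w).length = w.length := by
  intro xs
  induction xs with
  | nil => intro w; rfl
  | cons x xs ih => intro w; rw [List.foldl_cons, ih, h]

-- repeated in-place addition at one fixed index y
theorem pv_innerW_eq (a1 : Nat → Int) (y : Nat) :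
    ∀ (xs : List Nat) (w : List Int), y < w.length →
      xs.foldl (fun w x => w.set y (w.getD y 0 + a1 x)) w
        = w.set y (w.getD y 0 + (xs.map a1).sum) := by
  intro xs
  induction xs with
  | nil =>
    intro w hy
    simp only [List.map_nil, List.sum_nil, add_zero, List.foldl_nil]
    rw [List.getD_eq_getElem _ _ hy, List.set_getElem_self]
  | cons x xs ih =>
    intro w hy
    rw [List.foldl_cons, ih _ (by simpa using hy)]
    rw [List.set_set, List.getD_eq_getElem?_getD, List.getElem?_set_self (by simpa using hy)]
    simp [List.getD_eq_getElem?_getD, add_assoc]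

-- each index updated at most once (Nodup): elementwise description
theorem pv_innerK_getD (a1 : Nat → Int) :
    ∀ (xs : List Nat) (k : List Int) (i : Nat), xs.Nodup → (∀ x ∈ xs, x < k.length) →
      (xs.foldl (fun k x => k.set x (k.getD x 0 + a1 x)) k).getD i 0
        = k.getD i 0 + (if i ∈ xs then a1 i else 0) := by
  intro xs
  induction xs with
  | nil => intro k i _ _; simp
  | cons x xs ih =>
    intro k i hnd hlt
    have hx : x < k.length := hlt x (by simp)
    rw [List.foldl_cons, ih _ i hnd.of_cons (by intro z hz; simpa using hlt z (by simp [hz]))]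
    by_cases hix : i = x
    · subst hix
      have hni : i ∉ xs := (List.nodup_cons.mp hnd).1
      simp [hni, List.getD_eq_getElem?_getD, List.getElem?_set_self hx]
    · rw [List.getD_eq_getElem?_getD, List.getElem?_set_ne (by omega), ← List.getD_eq_getElem?_getD]
      by_cases him : i ∈ xs <;> simp [him, hix]

theorem pv_WFold_getD (a : Nat → Nat → Int) (n : Nat) :
    ∀ (ys : List Nat) (w : List Int) (i : Nat), ys.Nodup → (∀ y ∈ ys, y < w.length) →
      (ys.foldl (fun w y => (List.range n).foldl (fun w x => w.set y (w.getD y 0 + a y x)) w) w).getD i 0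
        = w.getD i 0 + (if i ∈ ys then ((List.range n).map (a i)).sum else 0) := by
  intro ys
  induction ys with
  | nil => intro w i _ _; simp
  | cons y ys ih =>
    intro w i hnd hlt
    have hy : y < w.length := hlt y (by simp)
    rw [List.foldl_cons, pv_innerW_eq (a y) y (List.range n) w hy]
    rw [ih _ i hnd.of_cons (by intro z hz; simpa using hlt z (by simp [hz]))]
    by_cases hiy : i = y
    · subst hiy
      have hni : i ∉ ys := (List.nodup_cons.mp hnd).1
      simp [hni, List.getD_eq_getElem?_getD, List.getElem?_set_self hy]
    · rw [List.getD_eq_getElem?_getD, List.getElem?_set_ne (by omega), ← List.getD_eq_getElem?_getD]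
      by_cases him : i ∈ ys <;> simp [him, hiy]

theorem pv_inner_len (a1 : Nat → Int) (xs : List Nat) (k : List Int) :
    (xs.foldl (fun k x => k.set x (k.getD x 0 + a1 x)) k).length = k.length :=
  pv_foldl_len _ (by intro w x; simp) xs k

theorem pv_innerW_len (a1 : Nat → Int) (y : Nat) (xs : List Nat) (w : List Int) :
    (xs.foldl (fun w x => w.set y (w.getD y 0 + a1 x)) w).length = w.length :=
  pv_foldl_len _ (by intro w x; simp) xs w

theorem pv_KFold_getD (a : Nat → Nat → Int) (n : Nat) :
    ∀ (ys : List Nat) (k : List Int) (i : Nat), n ≤ k.length → i < n →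
      (ys.foldl (fun k y => (List.range n).foldl (fun k x => k.set x (k.getD x 0 + a y x)) k) k).getD i 0
        = k.getD i 0 + (ys.map (fun y => a y i)).sum := by
  intro ys
  induction ys with
  | nil => intro k i _ _; simp
  | cons y ys ih =>
    intro k i hn hi
    rw [List.foldl_cons]
    have hlen : ((List.range n).foldl (fun k x => k.set x (k.getD x 0 + a y x)) k).length = k.length :=
      pv_inner_len (a y) (List.range n) k
    rw [ih _ i (by omega) hi]
    rw [pv_innerK_getD (a y) (List.range n) k i (List.nodup_range) (by intro z hz; simp at hz; omega)]
    simp [hi, add_assoc]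

theorem pv_KFold_len (a : Nat → Nat → Int) (n : Nat) (ys : List Nat) (k : List Int) :
    (ys.foldl (fun k y => (List.range n).foldl (fun k x => k.set x (k.getD x 0 + a y x)) k) k).length = k.length :=
  pv_foldl_len _ (by intro w y; exact pv_inner_len (a y) (List.range n) w) ys k

theorem pv_WFold_len (a : Nat → Nat → Int) (n : Nat) (ys : List Nat) (w : List Int) :
    (ys.foldl (fun w y => (List.range n).foldl (fun w x => w.set y (w.getD y 0 + a y x)) w) w).length = w.length :=
  pv_foldl_len _ (by intro w y; exact pv_innerW_len (a y) y (List.range n) w) ys w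

theorem pv_alt_split (tab : List (List Int)) :
    sum_of_table_alt tab
      = ((List.range tab.length).foldl
           (fun k y => (List.range tab.length).foldl (fun k x => k.set x (k.getD x 0 + pvCell tab y x)) k)
           (List.replicate tab.length 0),
         (List.range tab.length).foldl
           (fun w y => (List.range tab.length).foldl (fun w x => w.set y (w.getD y 0 + pvCell tab y x)) w)
           (List.replicate tab.length 0)) := by
  have hdef : sum_of_table_alt tab
      = (List.range tab.length).foldl
          (fun (kw : List Int × List Int) (y : Nat) =>
            (List.range tab.length).foldl
              (fun (kw : List Int × List Int) x =>
                (kw.1.set x (kw.1.getD x 0 + pvCell tab y x),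
                 kw.2.set y (kw.2.getD y 0 + pvCell tab y x))) kw)
          (List.replicate tab.length 0, List.replicate tab.length 0) := rfl
  rw [hdef]
  have h : (fun (kw : List Int × List Int) (y : Nat) =>
        (List.range tab.length).foldl
          (fun (kw : List Int × List Int) x =>
            (kw.1.set x (kw.1.getD x 0 + pvCell tab y x),
             kw.2.set y (kw.2.getD y 0 + pvCell tab y x))) kw)
      = (fun (kw : List Int × List Int) (y : Nat) =>
          ((List.range tab.length).foldl (fun k x => k.set x (k.getD x 0 + pvCell tab y x)) kw.1,
           (List.range tab.length).foldl (fun w x => w.set y (w.getD y 0 + pvCell tab y x)) kw.2)) := by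
    funext kw y
    have := pv_foldl_pair_split (List.range tab.length)
      (fun k x => k.set x (k.getD x 0 + pvCell tab y x))
      (fun w x => w.set y (w.getD y 0 + pvCell tab y x)) kw.1 kw.2
    simpa using this
  rw [h]
  exact pv_foldl_pair_split (List.range tab.length)
    (fun k y => (List.range tab.length).foldl (fun k x => k.set x (k.getD x 0 + pvCell tab y x)) k)
    (fun w y => (List.range tab.length).foldl (fun w x => w.set y (w.getD y 0 + pvCell tab y x)) w)
    (List.replicate tab.length 0) (List.replicate tab.length 0)

theorem pv_main (tab : List (List Int)) : sum_of_table tab = sum_of_table_alt tab := by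
  rw [pv_alt_split]
  unfold sum_of_table
  refine Prod.ext ?_ ?_
  · -- kolumny
    apply List.ext_getElem
    · rw [pv_KFold_len]; simp
    · intro i h1 h2
      have hi : i < tab.length := by simpa using h1
      have hL := pv_KFold_len (pvCell tab) tab.length (List.range tab.length) (List.replicate tab.length 0)
      rw [← List.getD_eq_getElem _ 0 h2]
      simp only [List.getElem_map, List.getElem_range]
      rw [pv_KFold_getD (pvCell tab) tab.length (List.range tab.length) _ i (by simp) hi]
      rw [pv_foldl_add_sum]
      simp
  · -- wiersze
    apply List.ext_getElem
    · rw [pv_WFold_len]; simp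
    · intro i h1 h2
      have hi : i < tab.length := by simpa using h1
      rw [← List.getD_eq_getElem _ 0 h2]
      simp only [List.getElem_map, List.getElem_range]
      rw [pv_WFold_getD (pvCell tab) tab.length (List.range tab.length) _ i (List.nodup_range)
            (by intro z hz; simpa using hz)]
      rw [pv_foldl_add_sum]
      simp [hi]

-- ===== VERDICT (by name: the statement is the Claim_ definition above) =====
theorem sum_of_table_spec : Claim_equal_sum_of_table := by
  intro tab _ _
  unfold Spec_sum_of_table
  exact pv_main tab
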